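-- pv_equiv track=rewrite | github.com/tlijkkkk/mark_v | leetcode-practice/leetcode_practice/two_pointers/sliding_windows/leetcode1297_max_num_occurences_substring.py | max_num_occurences_substring
-- ===== SOURCE A (Python) =====
-- from typing import Dict
-- from collections import defaultdict
--
-- def max_num_occurences_substring(s: str, max_letters: int, min_size: int, max_size: int) -> int:
--     dt_unique_count: Dict[str, int] = defaultdict(int)
--     i = 0
--     dt_occur: Dict[str, int] = defaultdict(int)
--
--     for j in range(len(s)):
--         dt_unique_count[s[j]] += 1
--
--         while len(dt_unique_count) > max_letters or j - i + 1 > max_size: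
--             dt_unique_count[s[i]] -= 1
--             if dt_unique_count[s[i]] == 0:
--                 dt_unique_count.pop(s[i]) # safe because we are not iterating the dict directly
--             i += 1
--
--         if j - i + 1 >= min_size:
--             dt_occur[s[i: j + 1]] += 1
--             if j - i + 1 > min_size:
--                 dt_occur[s[j - min_size + 1: j + 1]] += 1
--
--     return max(dt_occur.values(), default=0)
-- ===== SOURCE B (Python) =====
-- def max_num_occurences_substring(s: str, max_letters: int, min_size: int, max_size: int) -> int:
--     # Only fixed-size windows of length min_size matter: any longer valid substring
--     # occurs at most as often as its length-min_size suffix.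
--     if min_size > max_size:
--         return 0
--     counts = {}
--     best = 0
--     for j in range(len(s) - min_size + 1):
--         w = s[j:j + min_size]
--         if len(set(w)) <= max_letters:
--             c = counts.get(w, 0) + 1
--             counts[w] = c
--             if c > best:
--                 best = c
--     return best
-- ===== Notes on version B (the rewrite author's own statement) =====
-- stated objective: alternative
-- what changed: A maintains a variable-size two-pointer window with a running character counter and counts both the full window and its min_size suffix per position; B only scans the fixed-size min_size windows (any longer valid substring occurs at most as often as its min_size suffix), counting each window whose distinct-letter count is within max_letters and keeping a running best.
-- outside the precondition, e.g. on max_num_occurences_substring('ab', 1, 0, 2): A returns 2, B returns 3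
import Mathlib
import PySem

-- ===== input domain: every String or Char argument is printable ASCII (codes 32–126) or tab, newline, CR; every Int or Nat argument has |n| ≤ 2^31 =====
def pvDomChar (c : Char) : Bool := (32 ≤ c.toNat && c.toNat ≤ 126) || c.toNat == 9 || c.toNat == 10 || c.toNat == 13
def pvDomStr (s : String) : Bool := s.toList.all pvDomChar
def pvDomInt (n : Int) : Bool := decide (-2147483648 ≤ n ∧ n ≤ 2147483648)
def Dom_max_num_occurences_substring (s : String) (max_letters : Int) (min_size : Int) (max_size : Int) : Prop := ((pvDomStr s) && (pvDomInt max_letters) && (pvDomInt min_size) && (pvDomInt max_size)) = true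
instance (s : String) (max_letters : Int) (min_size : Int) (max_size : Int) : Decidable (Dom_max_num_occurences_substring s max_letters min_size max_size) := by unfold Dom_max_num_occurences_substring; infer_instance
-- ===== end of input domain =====

-- B only scans the fixed min_size windows instead of A's variable two-pointer window
-- (a longer valid substring occurs at most as often as its min_size suffix): a different
-- algorithm that never builds or hashes windows longer than min_size.

-- ===== PORT A =====
-- the 'while' loop of A: shrink the window [i, j] until it has ≤ max_letters distinct
-- letters and length ≤ max_size
def pvShrink (cs : List Char) (max_letters max_size : Int) (j : Nat) (i : Nat)
    (dtU : PySem.Dict Char Int) : Nat × PySem.Dict Char Int :=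
  if ((dtU.size : Int) > max_letters ∨ (j : Int) - i + 1 > max_size) then
    match hc : cs[i]? with
    | some c =>
      let v := dtU.getD c 0 - 1
      let d1 := dtU.insert c v
      let d2 := if v = 0 then d1.erase c else d1
      pvShrink cs max_letters max_size j (i + 1) d2
    | none => (i, dtU)  -- Python raises IndexError here; only reached outside Pre_
  else (i, dtU)
termination_by cs.length - i
decreasing_by
  have : i < cs.length := (List.getElem?_eq_some_iff.mp hc).1
  omega

-- the body of A's 'for j in range(len(s))' loop
def pvStepA (cs : List Char) (max_letters min_size max_size : Int)
    (st : Nat × PySem.Dict Char Int × PySem.Dict (List Char) Int) (j : Nat) :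
    Nat × PySem.Dict Char Int × PySem.Dict (List Char) Int :=
  let c := PySem.List.pyGetD cs (j : Int) ' '  -- s[j]; j comes from range(len(s)), always in range
  let dtU1 := st.2.1.insert c (st.2.1.getD c 0 + 1)
  let p := pvShrink cs max_letters max_size j st.1 dtU1
  let dtO1 :=
    if min_size ≤ (j : Int) - p.1 + 1 then
      let w1 := PySem.List.slice cs (some (p.1 : Int)) (some ((j : Int) + 1))  -- s[i:j+1]
      let d1 := st.2.2.insert w1 (st.2.2.getD w1 0 + 1)
      if min_size < (j : Int) - p.1 + 1 then
        let w2 := PySem.List.slice cs (some ((j : Int) - min_size + 1)) (some ((j : Int) + 1))  -- s[j-min_size+1:j+1]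
        d1.insert w2 (d1.getD w2 0 + 1)
      else d1
    else st.2.2
  (p.1, p.2, dtO1)

def max_num_occurences_substring (s : String) (max_letters : Int) (min_size : Int) (max_size : Int) : Int :=
  let cs := s.toList
  let fin := (List.range cs.length).foldl (pvStepA cs max_letters min_size max_size)
    (0, PySem.Dict.empty, PySem.Dict.empty)
  PySem.List.maxD fin.2.2.values (fun v => v) 0  -- max(dt_occur.values(), default=0)

-- ===== PORT B =====
-- the body of B's 'for j in range(len(s) - min_size + 1)' loop
def pvStepB (cs : List Char) (max_letters min_size : Int)
    (st : PySem.Dict (List Char) Int × Int) (j : Int) :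
    PySem.Dict (List Char) Int × Int :=
  let w := PySem.List.slice cs (some j) (some (j + min_size))  -- s[j:j+min_size]
  if (PySem.Set.len (PySem.Set.ofList w)) ≤ max_letters then  -- len(set(w)) <= max_letters
    let c := st.1.getD w 0 + 1
    (st.1.insert w c, if c > st.2 then c else st.2)
  else st

def max_num_occurences_substring_alt (s : String) (max_letters : Int) (min_size : Int) (max_size : Int) : Int :=
  if min_size > max_size then 0
  else
    let cs := s.toList
    let fin := (PySem.List.pyRange 0 ((PySem.List.len cs) - min_size + 1) 1).foldl
      (pvStepB cs max_letters min_size) (PySem.Dict.empty, 0)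
    fin.2

-- ===== PRECONDITION & SPEC =====
-- Pre_ restricts to the natural domain min_size ≥ 1 (a window size; for min_size ≤ 0 A's
-- value counts degenerate empty windows, an artefact B does not reproduce), and excludes
-- nonempty s with max_letters < 0 or max_size < 0, where A raises IndexError.
def Pre_max_num_occurences_substring (s : String) (max_letters : Int) (min_size : Int) (max_size : Int) : Prop :=
  1 ≤ min_size ∧ (s = "" ∨ (0 ≤ max_letters ∧ 0 ≤ max_size))
instance (s : String) (max_letters : Int) (min_size : Int) (max_size : Int) : Decidable (Pre_max_num_occurences_substring s max_letters min_size max_size) := by unfold Pre_max_num_occurences_substring; infer_instance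

def pvWitness_max_num_occurences_substring : String × Int × Int × Int := ("aabab", 2, 2, 3)

def Spec_max_num_occurences_substring (s : String) (max_letters : Int) (min_size : Int) (max_size : Int) (out : Int) : Prop := out = max_num_occurences_substring_alt s max_letters min_size max_size
instance (s : String) (max_letters : Int) (min_size : Int) (max_size : Int) (out : Int) : Decidable (Spec_max_num_occurences_substring s max_letters min_size max_size out) := by unfold Spec_max_num_occurences_substring; infer_instance

-- ===== CLAIM (what is proved, stated in full; the proofs are below) =====
def Claim_equal_max_num_occurences_substring : Prop := ∀ (s : String) (max_letters : Int) (min_size : Int) (max_size : Int), Dom_max_num_occurences_substring s max_letters min_size max_size → Pre_max_num_occurences_substring s max_letters min_size max_size → Spec_max_num_occurences_substring s max_letters min_size max_size (max_num_occurences_substring s max_letters min_size max_size)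

-- ===== LEMMAS AND PROOFS =====

-- window s[i:t] (character positions i, …, t-1)
def pvWin (cs : List Char) (i t : Nat) : List Char := (cs.drop i).take (t - i)
-- the fixed min_size window starting at p
def pvMwin (cs : List Char) (m p : Nat) : List Char := (cs.drop p).take m
-- number of distinct characters
def pvDlen (l : List Char) : Nat := (PySem.Set.ofList l).length
-- A's window [i, t) is admissible
def pvValid (cs : List Char) (ml mx : Int) (i t : Nat) : Prop :=
  (pvDlen (pvWin cs i t) : Int) ≤ ml ∧ (t : Int) - (i : Int) ≤ mx
-- the min_size window starting at p has few enough distinct letters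
def pvOK (cs : List Char) (ml : Int) (m p : Nat) : Bool :=
  decide ((pvDlen (pvMwin cs m p) : Int) ≤ ml)
-- "step j of A increments the count of the length-m string w" (closed form, by the
-- two-pointer characterisation)
def pvPj (cs : List Char) (ml mn mx : Int) (m : Nat) (w : List Char) (j : Nat) : Bool :=
  decide (mn ≤ mx) && decide (m ≤ j + 1) && pvOK cs ml m (j + 1 - m) && (pvMwin cs m (j + 1 - m) == w)
def pvCntA (cs : List Char) (ml mn mx : Int) (m : Nat) (t : Nat) (w : List Char) : Nat :=
  ((List.range t).filter (pvPj cs ml mn mx m w)).length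
def pvCntB (cs : List Char) (ml : Int) (m : Nat) (t : Nat) (w : List Char) : Nat :=
  ((List.range t).filter (fun p => pvOK cs ml m p && (pvMwin cs m p == w))).length
-- the last m characters of w
def pvLastm (m : Nat) (w : List Char) : List Char := w.drop (w.length - m)

-- ---- small Dict.erase lemmas (none exist in PySem) ----
theorem pv_find?_filter_ne {κ ν : Type} [BEq κ] [LawfulBEq κ] (l : List (κ × ν)) (k k' : κ)
    (h : k' ≠ k) :
    (l.filter (fun p => !(p.1 == k))).find? (fun p => p.1 == k') = l.find? (fun p => p.1 == k') := by
  induction l with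
  | nil => rfl
  | cons p rest ih =>
    by_cases hk : p.1 = k
    · rw [List.filter_cons_of_neg (by simp [hk]),
        List.find?_cons_of_neg (by simp [hk]; exact fun e => h e.symm)]
      exact ih
    · rw [List.filter_cons_of_pos (by simp [hk])]
      by_cases hk2 : p.1 = k'
      · rw [List.find?_cons_of_pos (by simp [hk2]), List.find?_cons_of_pos (by simp [hk2])]
      · rw [List.find?_cons_of_neg (by simp [hk2]), List.find?_cons_of_neg (by simp [hk2])]
        exact ih

theorem pv_get?_erase_self {κ ν : Type} [BEq κ] [LawfulBEq κ] (d : PySem.Dict κ ν) (k : κ) :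
    (d.erase k).get? k = none := by
  have h : (d.items.filter (fun p => !(p.1 == k))).find? (fun p => p.1 == k) = none := by
    rw [List.find?_eq_none]
    intro p hp
    have := (List.mem_filter.mp hp).2
    simpa using this
  simp [PySem.Dict.erase, PySem.Dict.get?, h]

theorem pv_get?_erase_of_ne {κ ν : Type} [BEq κ] [LawfulBEq κ] (d : PySem.Dict κ ν) (k k' : κ)
    (h : k' ≠ k) : (d.erase k).get? k' = d.get? k' := by
  show (Option.map _ (List.find? _ (List.filter _ d.items))) = _
  rw [pv_find?_filter_ne d.items k k' h]
  rfl

theorem pv_contains_erase_self {κ ν : Type} [BEq κ] [LawfulBEq κ] (d : PySem.Dict κ ν) (k : κ) :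
    (d.erase k).contains k = false := by
  simp [PySem.Dict.erase, PySem.Dict.contains]

theorem pv_contains_erase_of_ne {κ ν : Type} [BEq κ] [LawfulBEq κ] (d : PySem.Dict κ ν) (k k' : κ)
    (h : k' ≠ k) : (d.erase k).contains k' = d.contains k' := by
  rw [Bool.eq_iff_iff]
  simp only [PySem.Dict.erase, PySem.Dict.contains, List.any_eq_true, List.mem_filter]
  constructor
  · rintro ⟨p, ⟨hp, _⟩, h2⟩
    exact ⟨p, hp, h2⟩
  · rintro ⟨p, hp, h2⟩
    refine ⟨p, ⟨hp, ?_⟩, h2⟩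
    have : p.1 = k' := by simpa using h2
    simp [this, h]

theorem pv_nodup_keys_erase {κ ν : Type} [BEq κ] [LawfulBEq κ] (d : PySem.Dict κ ν) (k : κ)
    (h : d.keys.Nodup) : (d.erase k).keys.Nodup := by
  have hs : (List.map (fun p => p.1) (List.filter (fun p => !(p.1 == k)) d.items)).Sublist
      (List.map (fun p => p.1) d.items) :=
    (List.filter_sublist (l := d.items) (p := fun p => !(p.1 == k))).map _
  exact h.sublist hs

theorem pv_getD_erase_self {κ ν : Type} [BEq κ] [LawfulBEq κ] (d : PySem.Dict κ ν) (k : κ) (d0 : ν) :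
    (d.erase k).getD k d0 = d0 := by
  rw [PySem.Dict.getD_eq_get?_getD, pv_get?_erase_self]
  rfl

theorem pv_getD_erase_of_ne {κ ν : Type} [BEq κ] [LawfulBEq κ] (d : PySem.Dict κ ν) (k k' : κ)
    (h : k' ≠ k) (d0 : ν) : (d.erase k).getD k' d0 = d.getD k' d0 := by
  rw [PySem.Dict.getD_eq_get?_getD, pv_get?_erase_of_ne d k k' h, ← PySem.Dict.getD_eq_get?_getD]

-- ---- distinct-count lemmas ----
theorem pv_dlen_eq_card (l : List Char) : pvDlen l = l.toFinset.card := by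
  have hnd : (PySem.Set.ofList l).Nodup := PySem.Set.nodup_ofList l
  have hf : (PySem.Set.ofList l).toFinset = l.toFinset := by
    ext x
    simp [List.mem_toFinset, PySem.Set.mem_ofList]
  calc pvDlen l = (PySem.Set.ofList l).toFinset.card := (List.toFinset_card_of_nodup hnd).symm
    _ = l.toFinset.card := by rw [hf]

theorem pv_dlen_mono {l l' : List Char} (h : l ⊆ l') : pvDlen l ≤ pvDlen l' := by
  rw [pv_dlen_eq_card, pv_dlen_eq_card]
  apply Finset.card_le_card
  intro x hx
  simp only [List.mem_toFinset] at hx ⊢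
  exact h hx

theorem pv_size_eq_dlen (d : PySem.Dict Char Int) (l : List Char)
    (hnd : d.keys.Nodup) (hmem : ∀ c, d.contains c = true ↔ c ∈ l) :
    d.size = pvDlen l := by
  have hperm : d.keys.Perm (PySem.Set.ofList l) := by
    rw [List.perm_ext_iff_of_nodup hnd (PySem.Set.nodup_ofList l)]
    intro c
    rw [PySem.Set.mem_ofList, ← hmem c, ← PySem.Dict.contains_iff_mem_keys]
  have : d.keys.length = pvDlen l := hperm.length_eq
  simpa [PySem.Dict.size, PySem.Dict.keys] using this

-- ---- window algebra ----
theorem pvWin_nil (cs : List Char) (i t : Nat) (h : t ≤ i) : pvWin cs i t = [] := by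
  simp [pvWin, Nat.sub_eq_zero_of_le h]

theorem pvWin_length (cs : List Char) (i t : Nat) (hit : i ≤ t) (htn : t ≤ cs.length) :
    (pvWin cs i t).length = t - i := by
  simp [pvWin]; omega

theorem pvWin_succ (cs : List Char) (i t : Nat) (hit : i ≤ t) (htn : t < cs.length) :
    pvWin cs i (t + 1) = pvWin cs i t ++ [cs[t]] := by
  unfold pvWin
  have h1 : t + 1 - i = (t - i) + 1 := by omega
  rw [h1, List.take_succ]
  have h2 : (cs.drop i)[t - i]? = some cs[t] := by
    rw [List.getElem?_drop]
    have : i + (t - i) = t := by omega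
    rw [this, List.getElem?_eq_getElem htn]
  simp [h2]

theorem pvWin_cons (cs : List Char) (i t : Nat) (hit : i < t) (hin : i < cs.length) :
    pvWin cs i t = cs[i] :: pvWin cs (i + 1) t := by
  unfold pvWin
  rw [List.drop_eq_getElem_cons hin]
  have h1 : t - i = (t - (i + 1)) + 1 := by omega
  rw [h1, List.take_succ_cons]

theorem pvWin_split (cs : List Char) (i p t : Nat) (h1 : i ≤ p) (h2 : p ≤ t) :
    pvWin cs i t = pvWin cs i p ++ pvWin cs p t := by
  unfold pvWin
  have h3 : t - i = (p - i) + (t - p) := by omega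
  rw [h3, List.take_add, List.drop_drop]
  have h4 : i + (p - i) = p := by omega
  rw [h4]

theorem pvMwin_eq_win (cs : List Char) (m p : Nat) : pvMwin cs m p = pvWin cs p (p + m) := by
  simp [pvMwin, pvWin]

theorem pvMwin_length (cs : List Char) (m p : Nat) (h : p + m ≤ cs.length) :
    (pvMwin cs m p).length = m := by
  simp [pvMwin]; omega

-- invalid windows stay invalid as the right end advances
theorem pv_not_valid_mono (cs : List Char) (ml mx : Int) (i t : Nat)
    (h : ¬ pvValid cs ml mx i t) : ¬ pvValid cs ml mx i (t + 1) := by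
  intro h1
  apply h
  obtain ⟨ha, hb⟩ := h1
  constructor
  · refine le_trans ?_ ha
    have hsub : pvWin cs i t ⊆ pvWin cs i (t + 1) := by
      unfold pvWin
      intro x hx
      exact List.take_subset_take_left (cs.drop i) (by omega) hx
    exact_mod_cast pv_dlen_mono hsub
  · push_cast at hb ⊢
    omega

-- ---- the shrink loop ----
theorem pvShrink_spec (cs : List Char) (ml mx : Int) (hml : 0 ≤ ml) (hmx : 0 ≤ mx)
    (t : Nat) (ht : t < cs.length) :
    ∀ (i0 : Nat) (dtU : PySem.Dict Char Int), i0 ≤ t + 1 →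
    (∀ c, dtU.getD c 0 = ((pvWin cs i0 (t + 1)).count c : Int)) →
    dtU.keys.Nodup →
    (∀ c, dtU.contains c = true ↔ c ∈ pvWin cs i0 (t + 1)) →
    (∀ i' < i0, ¬ pvValid cs ml mx i' (t + 1)) →
    (pvShrink cs ml mx t i0 dtU).1 ≤ t + 1 ∧
    (∀ c, (pvShrink cs ml mx t i0 dtU).2.getD c 0 =
      ((pvWin cs (pvShrink cs ml mx t i0 dtU).1 (t + 1)).count c : Int)) ∧
    (pvShrink cs ml mx t i0 dtU).2.keys.Nodup ∧
    (∀ c, (pvShrink cs ml mx t i0 dtU).2.contains c = true ↔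
      c ∈ pvWin cs (pvShrink cs ml mx t i0 dtU).1 (t + 1)) ∧
    pvValid cs ml mx (pvShrink cs ml mx t i0 dtU).1 (t + 1) ∧
    (∀ i' < (pvShrink cs ml mx t i0 dtU).1, ¬ pvValid cs ml mx i' (t + 1)) := by
  suffices H : ∀ (k : Nat) (i0 : Nat) (dtU : PySem.Dict Char Int), t + 1 - i0 ≤ k →
      i0 ≤ t + 1 →
      (∀ c, dtU.getD c 0 = ((pvWin cs i0 (t + 1)).count c : Int)) →
      dtU.keys.Nodup →
      (∀ c, dtU.contains c = true ↔ c ∈ pvWin cs i0 (t + 1)) →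
      (∀ i' < i0, ¬ pvValid cs ml mx i' (t + 1)) →
      (pvShrink cs ml mx t i0 dtU).1 ≤ t + 1 ∧
      (∀ c, (pvShrink cs ml mx t i0 dtU).2.getD c 0 =
        ((pvWin cs (pvShrink cs ml mx t i0 dtU).1 (t + 1)).count c : Int)) ∧
      (pvShrink cs ml mx t i0 dtU).2.keys.Nodup ∧
      (∀ c, (pvShrink cs ml mx t i0 dtU).2.contains c = true ↔
        c ∈ pvWin cs (pvShrink cs ml mx t i0 dtU).1 (t + 1)) ∧
      pvValid cs ml mx (pvShrink cs ml mx t i0 dtU).1 (t + 1) ∧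
      (∀ i' < (pvShrink cs ml mx t i0 dtU).1, ¬ pvValid cs ml mx i' (t + 1)) by
    exact fun i0 dtU h1 h2 h3 h4 h5 => H (t + 1) i0 dtU (by omega) h1 h2 h3 h4 h5
  intro k
  induction k with
  | zero =>
    intro i0 dtU hk h1 h2 h3 h4 h5
    have hi0 : i0 = t + 1 := by omega
    subst hi0
    have hwin : pvWin cs (t + 1) (t + 1) = [] := pvWin_nil cs (t + 1) (t + 1) le_rfl
    have hsz : dtU.size = 0 := by
      rw [pv_size_eq_dlen dtU _ h3 h4, hwin]; rfl
    have hcond : ¬ ((dtU.size : Int) > ml ∨ (t : Int) - (t + 1 : Nat) + 1 > mx) := by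
      rw [hsz]; push_cast; omega
    have heq : pvShrink cs ml mx t (t + 1) dtU = (t + 1, dtU) := by
      rw [pvShrink, if_neg hcond]
    refine ⟨by rw [heq], by rw [heq]; exact h2, by rw [heq]; exact h3, by rw [heq]; exact h4, ?_, by rw [heq]; exact h5⟩
    rw [heq]
    constructor
    · simp only [hwin]
      have : pvDlen ([] : List Char) = 0 := rfl
      rw [this]; exact_mod_cast hml
    · push_cast; omega
  | succ k ih =>
    intro i0 dtU hk h1 h2 h3 h4 h5
    by_cases hcond : ((dtU.size : Int) > ml ∨ (t : Int) - (i0 : Nat) + 1 > mx)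
    · -- the loop body runs
      have hi0t : i0 ≤ t := by
        by_contra hgt
        have hi0 : i0 = t + 1 := by omega
        subst hi0
        have hwin : pvWin cs (t + 1) (t + 1) = [] := pvWin_nil cs (t + 1) (t + 1) le_rfl
        have hsz : dtU.size = 0 := by
          rw [pv_size_eq_dlen dtU _ h3 h4, hwin]; rfl
        rw [hsz] at hcond
        push_cast at hcond
        omega
      have hi : i0 < cs.length := by omega
      have hsome : cs[i0]? = some cs[i0] := List.getElem?_eq_getElem hi
      have hwin : pvWin cs i0 (t + 1) = cs[i0] :: pvWin cs (i0 + 1) (t + 1) :=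
        pvWin_cons cs i0 (t + 1) (by omega) hi
      set c0 := cs[i0] with hc0
      set w' := pvWin cs (i0 + 1) (t + 1) with hw'
      have hv : dtU.getD c0 0 - 1 = (w'.count c0 : Int) := by
        rw [h2 c0, hwin, List.count_cons_self]
        push_cast; ring
      have hnotvalid : ¬ pvValid cs ml mx i0 (t + 1) := by
        intro hval
        obtain ⟨ha, hb⟩ := hval
        rw [pv_size_eq_dlen dtU _ h3 h4] at hcond
        rcases hcond with hc | hc
        · omega
        · push_cast at hb; omega
      have h5' : ∀ i' < i0 + 1, ¬ pvValid cs ml mx i' (t + 1) := by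
        intro i' hi'
        rcases Nat.lt_succ_iff_lt_or_eq.mp hi' with h | h
        · exact h5 i' h
        · subst h; exact hnotvalid
      have heq : pvShrink cs ml mx t i0 dtU = pvShrink cs ml mx t (i0 + 1)
          (if dtU.getD c0 0 - 1 = 0 then (dtU.insert c0 (dtU.getD c0 0 - 1)).erase c0
           else dtU.insert c0 (dtU.getD c0 0 - 1)) := by
        conv_lhs => rw [pvShrink]
        rw [if_pos hcond]
        split
        · rename_i c hc
          rw [hsome] at hc
          cases hc
          rfl
        · rename_i hc
          rw [hsome] at hc
          cases hc
      rw [heq]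
      by_cases hz : dtU.getD c0 0 - 1 = 0
      · rw [if_pos hz]
        have hcnt0 : w'.count c0 = 0 := by
          have := hv; rw [hz] at this; exact_mod_cast this.symm
        have hmem0 : c0 ∉ w' := by
          rw [← List.count_eq_zero]; exact hcnt0
        apply ih (i0 + 1) _ (by omega) (by omega)
        · intro ch
          by_cases hch : ch = c0
          · subst hch
            rw [pv_getD_erase_self]
            rw [hcnt0]; rfl
          · rw [pv_getD_erase_of_ne _ _ _ hch, PySem.Dict.getD_insert_of_ne _ _ _ hch, h2 ch, hwin]
            simp [List.count_cons, ← hw', Ne.symm hch]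
        · exact pv_nodup_keys_erase _ _ (PySem.Dict.nodup_keys_insert _ _ _ h3)
        · intro ch
          by_cases hch : ch = c0
          · subst hch
            rw [pv_contains_erase_self]
            simp [← hw', hmem0]
          · rw [pv_contains_erase_of_ne _ _ _ hch, PySem.Dict.contains_insert]
            have : (ch == c0) = false := by simp [hch]
            rw [this]
            simp only [Bool.false_or]
            rw [h4 ch, hwin]
            simp [hch, ← hw']
        · exact h5'
      · rw [if_neg hz]
        have hmem1 : c0 ∈ w' := by
          rw [← List.count_pos_iff]
          have : (w'.count c0 : Int) ≠ 0 := by rw [← hv]; exact hz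
          omega
        apply ih (i0 + 1) _ (by omega) (by omega)
        · intro ch
          by_cases hch : ch = c0
          · subst hch
            rw [PySem.Dict.getD_insert_self, hv]
          · rw [PySem.Dict.getD_insert_of_ne _ _ _ hch, h2 ch, hwin]
            simp [List.count_cons, ← hw', Ne.symm hch]
        · exact PySem.Dict.nodup_keys_insert _ _ _ h3
        · intro ch
          by_cases hch : ch = c0
          · subst hch
            rw [PySem.Dict.contains_insert_self]
            simp [← hw', hmem1]
          · rw [PySem.Dict.contains_insert]
            have : (ch == c0) = false := by simp [hch]
            rw [this]
            simp only [Bool.false_or]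
            rw [h4 ch, hwin]
            simp [hch, ← hw']
        · exact h5'
    · -- the loop exits
      have heq : pvShrink cs ml mx t i0 dtU = (i0, dtU) := by
        rw [pvShrink, if_neg hcond]
      refine ⟨by rw [heq]; exact h1, by rw [heq]; exact h2, by rw [heq]; exact h3,
        by rw [heq]; exact h4, ?_, by rw [heq]; exact h5⟩
      rw [heq]
      push_neg at hcond
      obtain ⟨ha, hb⟩ := hcond
      constructor
      · rw [← pv_size_eq_dlen dtU _ h3 h4]; exact ha
      · push_cast at hb ⊢; omega

-- ---- A's loop invariant ----
def pvInvA (cs : List Char) (ml mn mx : Int) (m : Nat) (t : Nat)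
    (st : Nat × PySem.Dict Char Int × PySem.Dict (List Char) Int) : Prop :=
  st.1 ≤ t ∧
  (∀ c, st.2.1.getD c 0 = ((pvWin cs st.1 t).count c : Int)) ∧
  st.2.1.keys.Nodup ∧
  (∀ c, st.2.1.contains c = true ↔ c ∈ pvWin cs st.1 t) ∧
  pvValid cs ml mx st.1 t ∧
  (∀ i' < st.1, ¬ pvValid cs ml mx i' t) ∧
  st.2.2.keys.Nodup ∧
  (∀ w, w.length = m → st.2.2.getD w 0 = (pvCntA cs ml mn mx m t w : Int)) ∧
  (∀ w, w.length ≠ m → 0 ≤ st.2.2.getD w 0 ∧ st.2.2.getD w 0 ≤ (pvCntA cs ml mn mx m t (pvLastm m w) : Int)) ∧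
  (∀ w ∈ st.2.2.keys, 1 ≤ st.2.2.getD w 0)

theorem pvCntA_succ (cs : List Char) (ml mn mx : Int) (m t : Nat) (w : List Char) :
    pvCntA cs ml mn mx m (t + 1) w =
      pvCntA cs ml mn mx m t w + (if pvPj cs ml mn mx m w t = true then 1 else 0) := by
  unfold pvCntA
  rw [List.range_succ, List.filter_append, List.length_append]
  congr 1
  by_cases h : pvPj cs ml mn mx m w t = true <;> simp [h]

theorem pvPj_iff (cs : List Char) (ml mn mx : Int) (m : Nat) (w : List Char) (t : Nat) :
    pvPj cs ml mn mx m w t = true ↔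
      (mn ≤ mx ∧ m ≤ t + 1 ∧ pvOK cs ml m (t + 1 - m) = true ∧ pvMwin cs m (t + 1 - m) = w) := by
  unfold pvPj
  simp [Bool.and_assoc]

-- the two-pointer characterisation: after shrinking, the window reaches back at least
-- min_size characters iff the fixed min_size window ending here is admissible
theorem pvL (cs : List Char) (ml mn mx : Int) (m : Nat) (hm : m = mn.toNat) (hmn : 1 ≤ mn)
    (T : Nat) (hT : T ≤ cs.length) (i1 : Nat) (hi1 : i1 ≤ T)
    (hval : pvValid cs ml mx i1 T) (hmin : ∀ i' < i1, ¬ pvValid cs ml mx i' T) :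
    (mn ≤ (T : Int) - (i1 : Int)) ↔ (mn ≤ mx ∧ m ≤ T ∧ pvOK cs ml m (T - m) = true) := by
  constructor
  · intro hlen
    obtain ⟨hd, hx⟩ := hval
    refine ⟨le_trans hlen hx, by omega, ?_⟩
    have hi1m : i1 ≤ T - m := by omega
    have hmw : pvMwin cs m (T - m) = pvWin cs (T - m) T := by
      rw [pvMwin_eq_win]
      congr 1
      omega
    have hsub : pvWin cs (T - m) T ⊆ pvWin cs i1 T := by
      rw [pvWin_split cs i1 (T - m) T hi1m (by omega)]
      exact fun x hx => List.mem_append_right _ hx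
    unfold pvOK
    rw [hmw]
    simp only [decide_eq_true_eq]
    calc ((pvDlen (pvWin cs (T - m) T)) : Int) ≤ (pvDlen (pvWin cs i1 T) : Int) := by
          exact_mod_cast pv_dlen_mono hsub
      _ ≤ ml := hd
  · rintro ⟨hlemx, hmT, hOK⟩
    have hvalTm : pvValid cs ml mx (T - m) T := by
      constructor
      · have hmw : pvMwin cs m (T - m) = pvWin cs (T - m) T := by
          rw [pvMwin_eq_win]; congr 1; omega
        unfold pvOK at hOK
        simp only [decide_eq_true_eq] at hOK
        rw [← hmw]
        exact hOK
      · have : ((T : Int) - ((T - m : Nat) : Int)) = mn := by push_cast; omega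
        rw [this]
        exact hlemx
    have : ¬ (T - m < i1) := fun hlt => hmin (T - m) hlt hvalTm
    push_cast
    omega

theorem pvInvA_init (cs : List Char) (ml mn mx : Int) (m : Nat) (hml : 0 ≤ ml) (hmx : 0 ≤ mx) :
    pvInvA cs ml mn mx m 0 (0, PySem.Dict.empty, PySem.Dict.empty) := by
  have hwin : pvWin cs 0 0 = [] := pvWin_nil cs 0 0 le_rfl
  refine ⟨le_rfl, ?_, ?_, ?_, ?_, ?_, ?_, ?_, ?_, ?_⟩
  · intro c; simp [PySem.Dict.getD_empty, hwin]
  · exact PySem.Dict.nodup_keys_empty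
  · intro c; simp [PySem.Dict.contains_empty, hwin]
  · constructor
    · simp only [hwin]
      have : pvDlen ([] : List Char) = 0 := rfl
      rw [this]; exact_mod_cast hml
    · simpa using hmx
  · intro i' hi'; omega
  · exact PySem.Dict.nodup_keys_empty
  · intro w _; simp [PySem.Dict.getD_empty, pvCntA]
  · intro w _; simp [PySem.Dict.getD_empty, pvCntA]
  · intro w hw; simp [PySem.Dict.keys_empty] at hw

theorem pvInvA_step (cs : List Char) (ml mn mx : Int) (m : Nat)
    (hml : 0 ≤ ml) (hmx : 0 ≤ mx) (hmn : 1 ≤ mn) (hm : m = mn.toNat)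
    (t : Nat) (ht : t < cs.length) (st : Nat × PySem.Dict Char Int × PySem.Dict (List Char) Int)
    (hinv : pvInvA cs ml mn mx m t st) :
    pvInvA cs ml mn mx m (t + 1) (pvStepA cs ml mn mx st t) := by
  obtain ⟨h1, h2, h3, h4, h5, h6, h7, h8, h9, h10⟩ := hinv
  have hm1 : 1 ≤ m := by omega
  have hc : PySem.List.pyGetD cs (t : Int) ' ' = cs[t] := by
    rw [PySem.List.pyGetD_natCast]
    exact List.getD_eq_getElem cs ' ' ht
  have hwsucc : pvWin cs st.1 (t + 1) = pvWin cs st.1 t ++ [cs[t]] := pvWin_succ cs st.1 t h1 ht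
  simp only [pvStepA, hc]
  set dtU1 := st.2.1.insert cs[t] (st.2.1.getD cs[t] 0 + 1) with hdtU1
  have hu2 : ∀ c, dtU1.getD c 0 = ((pvWin cs st.1 (t + 1)).count c : Int) := by
    intro ch
    by_cases hch : ch = cs[t]
    · subst hch
      rw [hdtU1, PySem.Dict.getD_insert_self, h2 _, hwsucc]
      simp
    · rw [hdtU1, PySem.Dict.getD_insert_of_ne _ _ _ hch, h2 _, hwsucc]
      rw [List.count_append]
      have : List.count ch [cs[t]] = 0 := by
        rw [List.count_eq_zero]
        simp [hch]
      rw [this]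
      simp
  have hu3 : dtU1.keys.Nodup := PySem.Dict.nodup_keys_insert _ _ _ h3
  have hu4 : ∀ c, dtU1.contains c = true ↔ c ∈ pvWin cs st.1 (t + 1) := by
    intro ch
    by_cases hch : ch = cs[t]
    · subst hch
      rw [hdtU1]
      simp [PySem.Dict.contains_insert_self, hwsucc]
    · rw [hdtU1, PySem.Dict.contains_insert]
      have : (ch == cs[t]) = false := by simp [hch]
      rw [this]
      simp only [Bool.false_or]
      rw [h4 ch, hwsucc]
      simp [hch]
  have hu6 : ∀ i' < st.1, ¬ pvValid cs ml mx i' (t + 1) := by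
    intro i' hi'
    exact pv_not_valid_mono cs ml mx i' t (h6 i' hi')
  have S := pvShrink_spec cs ml mx hml hmx t ht st.1 dtU1 (by omega) hu2 hu3 hu4 hu6
  set p := pvShrink cs ml mx t st.1 dtU1 with hp
  obtain ⟨S1, S2, S3, S4, S5, S6⟩ := S
  have hTn : t + 1 ≤ cs.length := by omega
  have hL := pvL cs ml mn mx m hm hmn (t + 1) hTn p.1 S1 S5 S6
  have hcast : ((t + 1 : Nat) : Int) - (p.1 : Int) = (t : Int) - (p.1 : Int) + 1 := by push_cast; ring
  rw [hcast] at hL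
  have hslice1 : PySem.List.slice cs (some (p.1 : Int)) (some ((t : Int) + 1)) = pvWin cs p.1 (t + 1) := by
    have h' : ((t : Int) + 1) = ((t + 1 : Nat) : Int) := by push_cast; ring
    rw [h', PySem.List.slice_natCast]
    rfl
  have hcnt_nonneg : ∀ w, (0 : Int) ≤ st.2.2.getD w 0 := by
    intro w
    by_cases hlw : w.length = m
    · rw [h8 w hlw]; positivity
    · exact (h9 w hlw).1
  by_cases hc1 : mn ≤ (t : Int) - (p.1 : Int) + 1
  case neg =>
    rw [if_neg hc1]
    have hPjfalse : ∀ w, pvPj cs ml mn mx m w t = false := by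
      intro w
      rw [← Bool.not_eq_true, pvPj_iff]
      rintro ⟨ha, hb, hc', _⟩
      exact hc1 (hL.2 ⟨ha, hb, hc'⟩)
    have hcnt_eq : ∀ w, pvCntA cs ml mn mx m (t + 1) w = pvCntA cs ml mn mx m t w := by
      intro w
      rw [pvCntA_succ, hPjfalse w]
      simp
    exact ⟨S1, S2, S3, S4, S5, S6, h7,
      fun w hw => by rw [hcnt_eq w]; exact h8 w hw,
      fun w hw => by rw [hcnt_eq (pvLastm m w)]; exact h9 w hw,
      h10⟩
  case pos =>
    rw [if_pos hc1]
    obtain ⟨hlemx, hmT, hOK⟩ := hL.1 hc1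
    set p0 := t + 1 - m with hp0
    set w0 := pvMwin cs m p0 with hw0
    have hw0len : w0.length = m := pvMwin_length cs m p0 (by omega)
    have hw0win : w0 = pvWin cs p0 (t + 1) := by
      rw [hw0, pvMwin_eq_win]; congr 1; omega
    have hw1len : (pvWin cs p.1 (t + 1)).length = t + 1 - p.1 := pvWin_length cs p.1 (t + 1) S1 hTn
    have hPj_w0 : pvPj cs ml mn mx m w0 t = true := by
      rw [pvPj_iff]
      exact ⟨hlemx, hmT, hOK, rfl⟩
    have hPj_ne : ∀ w, w ≠ w0 → pvPj cs ml mn mx m w t = false := by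
      intro w hw
      rw [← Bool.not_eq_true, pvPj_iff]
      rintro ⟨_, _, _, hEq⟩
      exact hw hEq.symm
    have hcnt_w0 : pvCntA cs ml mn mx m (t + 1) w0 = pvCntA cs ml mn mx m t w0 + 1 := by
      rw [pvCntA_succ, hPj_w0]
      simp
    have hcnt_ne : ∀ w, w ≠ w0 → pvCntA cs ml mn mx m (t + 1) w = pvCntA cs ml mn mx m t w := by
      intro w hw
      rw [pvCntA_succ, hPj_ne w hw]
      simp
    have hmint : (m : Int) = mn := by
      rw [hm]; exact Int.toNat_of_nonneg (by omega)
    have hmono : ∀ w, pvCntA cs ml mn mx m t w ≤ pvCntA cs ml mn mx m (t + 1) w := by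
      intro w
      rw [pvCntA_succ]
      split <;> omega
    by_cases hc2 : mn < (t : Int) - (p.1 : Int) + 1
    case neg =>
      rw [if_neg hc2]
      have hi1p0 : p.1 = p0 := by
        have h' : (t : Int) - (p.1 : Int) + 1 = mn := by omega
        rw [hp0]; omega
      have hw1 : PySem.List.slice cs (some (p.1 : Int)) (some ((t : Int) + 1)) = w0 := by
        rw [hslice1, hi1p0, ← hw0win]
      rw [hw1]
      refine ⟨S1, S2, S3, S4, S5, S6, PySem.Dict.nodup_keys_insert _ _ _ h7, ?_, ?_, ?_⟩
      · intro w hw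
        by_cases hww : w = w0
        · subst hww
          rw [PySem.Dict.getD_insert_self, h8 _ hw, hcnt_w0]
          push_cast; ring
        · rw [PySem.Dict.getD_insert_of_ne _ _ _ hww, h8 w hw, hcnt_ne w hww]
      · intro w hw
        have hww : w ≠ w0 := fun e => hw (e ▸ hw0len)
        rw [PySem.Dict.getD_insert_of_ne _ _ _ hww]
        exact ⟨(h9 w hw).1, le_trans (h9 w hw).2 (by exact_mod_cast hmono (pvLastm m w))⟩
      · intro w hwk
        by_cases hww : w = w0
        · subst hww
          rw [PySem.Dict.getD_insert_self]
          have := hcnt_nonneg w0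
          omega
        · rw [PySem.Dict.getD_insert_of_ne _ _ _ hww]
          rcases (PySem.Dict.mem_keys_insert _ _ _ _).mp hwk with h | h
          · exact absurd h hww
          · exact h10 w h
    case pos =>
      rw [if_pos hc2]
      set w1 := PySem.List.slice cs (some (p.1 : Int)) (some ((t : Int) + 1)) with hw1def
      have hw1win' : w1 = pvWin cs p.1 (t + 1) := hslice1
      have hw1len' : w1.length = t + 1 - p.1 := by rw [hw1win']; exact hw1len
      have hmlt : m < t + 1 - p.1 := by omega
      have hw1ne : w1.length ≠ m := by omega
      have hw1nw0 : w1 ≠ w0 := fun e => hw1ne (e ▸ hw0len)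
      have hw0nw1 : w0 ≠ w1 := fun e => hw1nw0 e.symm
      have hslice2 : PySem.List.slice cs (some ((t : Int) - mn + 1)) (some ((t : Int) + 1)) = w0 := by
        have ha : ((t : Int) - mn + 1) = ((p0 : Nat) : Int) := by rw [hp0]; push_cast; omega
        have hb : ((t : Int) + 1) = ((t + 1 : Nat) : Int) := by push_cast; ring
        rw [ha, hb, PySem.List.slice_natCast, hw0, pvMwin]
        congr 1
        omega
      have hlast : pvLastm m w1 = w0 := by
        rw [pvLastm, hw1len', hw1win', pvWin, List.drop_take, List.drop_drop, hw0, pvMwin]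
        congr 1
        · omega
        · congr 1; omega
      rw [hslice2]
      set d1 := st.2.2.insert w1 (st.2.2.getD w1 0 + 1) with hd1
      have hd1nodup : d1.keys.Nodup := PySem.Dict.nodup_keys_insert _ _ _ h7
      have hd1w0 : d1.getD w0 0 = st.2.2.getD w0 0 := by
        rw [hd1, PySem.Dict.getD_insert_of_ne _ _ _ hw0nw1]
      refine ⟨S1, S2, S3, S4, S5, S6, PySem.Dict.nodup_keys_insert _ _ _ hd1nodup, ?_, ?_, ?_⟩
      · intro w hw
        have hww1 : w ≠ w1 := fun e => hw1ne (e ▸ hw)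
        by_cases hww : w = w0
        · subst hww
          rw [PySem.Dict.getD_insert_self, hd1w0, h8 _ hw, hcnt_w0]
          push_cast; ring
        · rw [PySem.Dict.getD_insert_of_ne _ _ _ hww, hd1, PySem.Dict.getD_insert_of_ne _ _ _ hww1,
            h8 w hw, hcnt_ne w hww]
      · intro w hw
        have hww0 : w ≠ w0 := fun e => hw (e ▸ hw0len)
        rw [PySem.Dict.getD_insert_of_ne _ _ _ hww0]
        by_cases hww1 : w = w1
        · subst hww1
          rw [hd1, PySem.Dict.getD_insert_self]
          constructor
          · have := hcnt_nonneg w1; omega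
          · have hb := (h9 _ hw1ne).2
            rw [hlast] at hb
            rw [hlast, hcnt_w0]
            push_cast at hb ⊢
            omega
        · rw [hd1, PySem.Dict.getD_insert_of_ne _ _ _ hww1]
          exact ⟨(h9 w hw).1, le_trans (h9 w hw).2 (by exact_mod_cast hmono (pvLastm m w))⟩
      · intro w hwk
        by_cases hww : w = w0
        · subst hww
          rw [PySem.Dict.getD_insert_self]
          have := hcnt_nonneg w0
          rw [hd1w0]
          omega
        · rw [PySem.Dict.getD_insert_of_ne _ _ _ hww]
          by_cases hww1 : w = w1
          · subst hww1
            rw [hd1, PySem.Dict.getD_insert_self]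
            have := hcnt_nonneg w1
            omega
          · rw [hd1, PySem.Dict.getD_insert_of_ne _ _ _ hww1]
            rcases (PySem.Dict.mem_keys_insert _ _ _ _).mp hwk with h | h
            · exact absurd h hww
            · rcases (PySem.Dict.mem_keys_insert _ _ _ _).mp h with h' | h'
              · exact absurd h' hww1
              · exact h10 w h'

theorem pvInvA_all (cs : List Char) (ml mn mx : Int) (m : Nat)
    (hml : 0 ≤ ml) (hmx : 0 ≤ mx) (hmn : 1 ≤ mn) (hm : m = mn.toNat) (t : Nat) (ht : t ≤ cs.length) :
    pvInvA cs ml mn mx m t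
      ((List.range t).foldl (pvStepA cs ml mn mx) (0, PySem.Dict.empty, PySem.Dict.empty)) := by
  induction t with
  | zero => simpa using pvInvA_init cs ml mn mx m hml hmx
  | succ t ih =>
    rw [List.range_succ, List.foldl_append, List.foldl_cons, List.foldl_nil]
    exact pvInvA_step cs ml mn mx m hml hmx hmn hm t (by omega) _ (ih (by omega))

-- ---- reindexing: A's per-position counts are B's per-start counts ----
theorem pvCnt_reindex (cs : List Char) (ml mn mx : Int) (m : Nat) (hm : 1 ≤ m) (hle : mn ≤ mx)
    (w : List Char) :
    pvCntA cs ml mn mx m cs.length w = pvCntB cs ml m (cs.length + 1 - m) w := by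
  set n := cs.length with hn
  by_cases hmn2 : m ≤ n
  · have h1 : List.range n = List.range (m - 1) ++ (List.range (n + 1 - m)).map (fun k => (m - 1) + k) := by
      rw [← List.range_add]
      congr 1
      omega
    unfold pvCntA pvCntB
    rw [h1, List.filter_append, List.length_append]
    have h2 : (List.range (m - 1)).filter (pvPj cs ml mn mx m w) = [] := by
      rw [List.filter_eq_nil_iff]
      intro j hj hp
      rw [List.mem_range] at hj
      obtain ⟨_, hb, _, _⟩ := (pvPj_iff cs ml mn mx m w j).mp hp
      omega
    rw [h2, List.length_nil, List.filter_map, List.length_map]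
    have h3 : ∀ k ∈ List.range (n + 1 - m),
        (pvPj cs ml mn mx m w ∘ (fun k => (m - 1) + k)) k
          = (pvOK cs ml m k && (pvMwin cs m k == w)) := by
      intro k hk
      show pvPj cs ml mn mx m w ((m - 1) + k) = _
      unfold pvPj
      have e1 : (decide (mn ≤ mx)) = true := by simp [hle]
      have e2 : (decide (m ≤ (m - 1) + k + 1)) = true := by simp; omega
      have e3 : (m - 1) + k + 1 - m = k := by omega
      rw [e1, e2, e3]
      simp
    rw [List.filter_congr h3]
    omega
  · have h2 : (List.range n).filter (pvPj cs ml mn mx m w) = [] := by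
      rw [List.filter_eq_nil_iff]
      intro j hj hp
      rw [List.mem_range] at hj
      obtain ⟨_, hb, _, _⟩ := (pvPj_iff cs ml mn mx m w j).mp hp
      omega
    have h3 : n + 1 - m = 0 := by omega
    unfold pvCntA pvCntB
    rw [h2, h3]
    rfl

theorem pvCntA_of_gt (cs : List Char) (ml mn mx : Int) (m : Nat) (hgt : ¬ mn ≤ mx)
    (t : Nat) (w : List Char) : pvCntA cs ml mn mx m t w = 0 := by
  unfold pvCntA
  have h : (List.range t).filter (pvPj cs ml mn mx m w) = [] := by
    rw [List.filter_eq_nil_iff]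
    intro j _ hp
    exact hgt ((pvPj_iff cs ml mn mx m w j).mp hp).1
  rw [h]
  rfl

-- ---- B's loop invariant ----
def pvInvB (cs : List Char) (ml : Int) (m : Nat) (t : Nat)
    (st : PySem.Dict (List Char) Int × Int) : Prop :=
  (∀ w, st.1.getD w 0 = (pvCntB cs ml m t w : Int)) ∧
  st.1.keys.Nodup ∧
  0 ≤ st.2 ∧
  (∀ w, (pvCntB cs ml m t w : Int) ≤ st.2) ∧
  (st.2 = 0 ∨ ∃ w, w.length = m ∧ st.2 = (pvCntB cs ml m t w : Int))

theorem pvCntB_succ (cs : List Char) (ml : Int) (m t : Nat) (w : List Char) :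
    pvCntB cs ml m (t + 1) w =
      pvCntB cs ml m t w + (if (pvOK cs ml m t && (pvMwin cs m t == w)) = true then 1 else 0) := by
  unfold pvCntB
  rw [List.range_succ, List.filter_append, List.length_append]
  congr 1
  by_cases h : (pvOK cs ml m t && (pvMwin cs m t == w)) = true <;> simp [h]

theorem pvInvB_all (cs : List Char) (ml mn : Int) (m : Nat) (hm : m = mn.toNat) (hmn : 1 ≤ mn)
    (t : Nat) (ht : t ≤ cs.length + 1 - m) :
    pvInvB cs ml m t
      (((List.range t).map (fun (p : Nat) => (p : Int))).foldl (pvStepB cs ml mn) (PySem.Dict.empty, 0)) := by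
  have hmint : (m : Int) = mn := by rw [hm]; exact Int.toNat_of_nonneg (by omega)
  induction t with
  | zero =>
    refine ⟨?_, PySem.Dict.nodup_keys_empty, le_rfl, ?_, Or.inl rfl⟩
    · intro w; simp [PySem.Dict.getD_empty, pvCntB]
    · intro w; simp [pvCntB]
  | succ t ih =>
    obtain ⟨B1, B2, B3, B4, B5⟩ := ih (by omega)
    set prev := ((List.range t).map (fun (p : Nat) => (p : Int))).foldl (pvStepB cs ml mn) (PySem.Dict.empty, 0) with hprev
    rw [List.range_succ, List.map_append, List.foldl_append, List.map_cons, List.map_nil,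
      List.foldl_cons, List.foldl_nil]
    have hmn2 : m ≤ cs.length := by omega
    have htm : t + m ≤ cs.length := by omega
    have hslice : PySem.List.slice cs (some ((t : Nat) : Int)) (some (((t : Nat) : Int) + mn))
        = pvMwin cs m t := by
      have hb : ((t : Nat) : Int) + mn = ((t + m : Nat) : Int) := by push_cast; omega
      rw [hb, PySem.List.slice_natCast, pvMwin]
      congr 1
      omega
    set w0 := pvMwin cs m t with hw0
    have hw0len : w0.length = m := pvMwin_length cs m t htm
    show pvInvB cs ml m (t + 1) (pvStepB cs ml mn prev (t : Nat))
    unfold pvStepB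
    rw [hslice]
    have hsetlen : PySem.Set.len (PySem.Set.ofList w0) = (pvDlen w0 : Int) := rfl
    by_cases hOK : pvOK cs ml m t = true
    · have hcond : PySem.Set.len (PySem.Set.ofList w0) ≤ ml := by
        rw [hsetlen]
        unfold pvOK at hOK
        simpa using hOK
      rw [if_pos hcond]
      set c := prev.1.getD w0 0 + 1 with hcdef
      have hc : c = (pvCntB cs ml m t w0 : Int) + 1 := by rw [hcdef, B1 w0]
      have hcnt0 : pvCntB cs ml m (t + 1) w0 = pvCntB cs ml m t w0 + 1 := by
        rw [pvCntB_succ]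
        simp [hOK, hw0]
      have hcnt_ne : ∀ w, w ≠ w0 → pvCntB cs ml m (t + 1) w = pvCntB cs ml m t w := by
        intro w hw
        rw [pvCntB_succ]
        have : (pvMwin cs m t == w) = false := by
          simp only [beq_eq_false_iff_ne, ne_eq]
          exact fun e => hw (e.symm)
        simp [this]
      have hc1 : (1 : Int) ≤ c := by
        rw [hc]; omega
      refine ⟨?_, PySem.Dict.nodup_keys_insert _ _ _ B2, ?_, ?_, ?_⟩
      · intro w
        by_cases hw : w = w0
        · subst hw
          rw [PySem.Dict.getD_insert_self, hc, hcnt0]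
          push_cast; ring
        · rw [PySem.Dict.getD_insert_of_ne _ _ _ hw, B1 w, hcnt_ne w hw]
      · show (0 : Int) ≤ if c > prev.2 then c else prev.2
        split <;> omega
      · intro w
        show (pvCntB cs ml m (t + 1) w : Int) ≤ if c > prev.2 then c else prev.2
        by_cases hw : w = w0
        · subst hw
          rw [hcnt0]
          have : (pvCntB cs ml m t w0 : Int) + 1 = c := hc.symm
          push_cast
          split <;> omega
        · rw [hcnt_ne w hw]
          have := B4 w
          split <;> omega
      · show (if c > prev.2 then c else prev.2) = 0 ∨
          ∃ w, w.length = m ∧ (if c > prev.2 then c else prev.2) = (pvCntB cs ml m (t + 1) w : Int)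
        by_cases hgt : c > prev.2
        · rw [if_pos hgt]
          exact Or.inr ⟨w0, hw0len, by rw [hc, hcnt0]; push_cast; ring⟩
        · rw [if_neg hgt]
          have hp1 : (1 : Int) ≤ prev.2 := by omega
          rcases B5 with h0 | ⟨w', hlw', he⟩
          · omega
          · refine Or.inr ⟨w', hlw', ?_⟩
            have hw' : w' ≠ w0 := by
              intro e
              subst e
              rw [← he] at hc
              omega
            rw [hcnt_ne w' hw']
            exact he
    · have hcond : ¬ (PySem.Set.len (PySem.Set.ofList w0) ≤ ml) := by
        rw [hsetlen]
        unfold pvOK at hOK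
        simpa using hOK
      rw [if_neg hcond]
      have hcnt_eq : ∀ w, pvCntB cs ml m (t + 1) w = pvCntB cs ml m t w := by
        intro w
        rw [pvCntB_succ]
        have : pvOK cs ml m t = false := by simpa using hOK
        simp [this]
      refine ⟨fun w => by rw [hcnt_eq w]; exact B1 w, B2, B3,
        fun w => by rw [hcnt_eq w]; exact B4 w, ?_⟩
      rcases B5 with h0 | ⟨w', hlw', he⟩
      · exact Or.inl h0
      · exact Or.inr ⟨w', hlw', by rw [hcnt_eq w']; exact he⟩

-- B's fold runs over exactly the casts of List.range (n + 1 - m)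
theorem pvRangeB (cs : List Char) (mn : Int) (hmn : 1 ≤ mn) :
    PySem.List.pyRange 0 ((PySem.List.len cs) - mn + 1) 1 =
      (List.range (cs.length + 1 - mn.toNat)).map (fun (p : Nat) => (p : Int)) := by
  rw [PySem.List.pyRange_one]
  have h1 : ((PySem.List.len cs) - mn + 1 - 0).toNat = cs.length + 1 - mn.toNat := by
    rw [PySem.List.len_eq]
    omega
  rw [h1]
  apply List.map_congr_left
  intro k _
  simp

-- ---- final assembly ----
theorem pv_main (cs : List Char) (ml mn mx : Int)
    (hml : 0 ≤ ml) (hmx : 0 ≤ mx) (hmn : 1 ≤ mn) :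
    max_num_occurences_substring (String.ofList cs) ml mn mx =
    max_num_occurences_substring_alt (String.ofList cs) ml mn mx := by
  set m := mn.toNat with hm
  simp only [max_num_occurences_substring, max_num_occurences_substring_alt, String.toList_ofList]
  have hInv := pvInvA_all cs ml mn mx m hml hmx hmn hm cs.length le_rfl
  set fin := (List.range cs.length).foldl (pvStepA cs ml mn mx) (0, PySem.Dict.empty, PySem.Dict.empty) with hfin
  obtain ⟨_, _, _, _, _, _, hA7, hA8, hA9, hA10⟩ := hInv
  set dtO := fin.2.2 with hdtO
  have hvals : dtO.values = dtO.keys.map (fun k => dtO.getD k 0) :=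
    PySem.Dict.values_eq_map_keys dtO hA7 0
  by_cases hcase : mn > mx
  · rw [if_pos hcase]
    have hkeys : dtO.keys = [] := by
      by_contra hne
      obtain ⟨w, hw⟩ := List.exists_mem_of_ne_nil _ hne
      have h1 := hA10 w hw
      by_cases hlw : w.length = m
      · rw [hA8 w hlw, pvCntA_of_gt cs ml mn mx m (by omega) _ w] at h1
        norm_num at h1
      · have h2 := (hA9 w hlw).2
        rw [pvCntA_of_gt cs ml mn mx m (by omega)] at h2
        norm_num at h2
        omega
    have hvals0 : dtO.values = [] := by rw [hvals, hkeys]; rfl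
    rw [hvals0]
    rfl
  · rw [if_neg hcase]
    have hle : mn ≤ mx := by omega
    rw [pvRangeB cs mn hmn]
    have hB := pvInvB_all cs ml mn m hm hmn (cs.length + 1 - m) le_rfl
    set stB := ((List.range (cs.length + 1 - m)).map (fun (p : Nat) => (p : Int))).foldl
      (pvStepB cs ml mn) (PySem.Dict.empty, 0) with hstB
    obtain ⟨B1, B2, B3, B4, B5⟩ := hB
    have hRIX : ∀ w, pvCntA cs ml mn mx m cs.length w = pvCntB cs ml m (cs.length + 1 - m) w :=
      fun w => pvCnt_reindex cs ml mn mx m (by omega) hle w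
    show PySem.List.maxD dtO.values (fun v => v) 0 = stB.2
    have hub : ∀ v ∈ dtO.values, v ≤ stB.2 := by
      intro v hv
      rw [hvals] at hv
      obtain ⟨k, hk, rfl⟩ := List.mem_map.mp hv
      by_cases hlk : k.length = m
      · rw [hA8 k hlk, hRIX k]
        exact B4 k
      · calc dtO.getD k 0 ≤ (pvCntA cs ml mn mx m cs.length (pvLastm m k) : Int) := (hA9 k hlk).2
          _ = (pvCntB cs ml m (cs.length + 1 - m) (pvLastm m k) : Int) := by rw [hRIX]
          _ ≤ stB.2 := B4 _
    have hA0 : 0 ≤ PySem.List.maxD dtO.values (fun v => v) 0 := by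
      unfold PySem.List.maxD
      cases hmm : PySem.List.max? dtO.values (fun v => v) with
      | none => simp
      | some v =>
        simp only [Option.getD_some]
        have hv := PySem.List.max?_mem hmm
        rw [hvals] at hv
        obtain ⟨k, hk, rfl⟩ := List.mem_map.mp hv
        have := hA10 k hk
        omega
    apply le_antisymm
    · unfold PySem.List.maxD
      cases hmm : PySem.List.max? dtO.values (fun v => v) with
      | none => simpa using B3
      | some v =>
        simp only [Option.getD_some]
        exact hub v (PySem.List.max?_mem hmm)
    · rcases B5 with hb0 | ⟨w, hlw, hbw⟩
      · rw [hb0]; exact hA0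
      · by_cases hz : pvCntB cs ml m (cs.length + 1 - m) w = 0
        · rw [hbw, hz]
          exact_mod_cast hA0
        · have hgd : dtO.getD w 0 = (pvCntB cs ml m (cs.length + 1 - m) w : Int) := by
            rw [hA8 w hlw, hRIX w]
          have hcont : dtO.contains w = true := by
            by_contra hnc
            rw [Bool.not_eq_true] at hnc
            have h0 := PySem.Dict.getD_of_not_contains dtO (0 : Int) hnc
            apply hz
            have : ((pvCntB cs ml m (cs.length + 1 - m) w : Int)) = 0 := by rw [← hgd, h0]
            exact_mod_cast this
          have hkmem : w ∈ dtO.keys := (PySem.Dict.contains_iff_mem_keys dtO w).mp hcont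
          have hvmem : dtO.getD w 0 ∈ dtO.values := by
            rw [hvals]
            exact List.mem_map_of_mem hkmem
          cases hmm : PySem.List.max? dtO.values (fun v => v) with
          | none =>
            rw [PySem.List.max?_eq_none_iff] at hmm
            rw [hmm] at hvmem
            cases hvmem
          | some v =>
            unfold PySem.List.maxD
            rw [hmm]
            simp only [Option.getD_some]
            have hle2 := PySem.List.max?_isMax hmm _ hvmem
            rw [hbw, ← hgd]
            exact hle2

theorem pv_empty (ml mn mx : Int) (hmn : 1 ≤ mn) :
    max_num_occurences_substring "" ml mn mx = max_num_occurences_substring_alt "" ml mn mx := by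
  simp only [max_num_occurences_substring, max_num_occurences_substring_alt]
  have hnil : ("" : String).toList = ([] : List Char) := rfl
  rw [hnil]
  by_cases h : mn > mx
  · rw [if_pos h]
    rfl
  · rw [if_neg h]
    have hr : PySem.List.pyRange 0 (PySem.List.len ([] : List Char) - mn + 1) 1 = [] :=
      PySem.List.pyRange_one_eq_nil (by rw [PySem.List.len_eq]; simp; omega)
    rw [hr]
    rfl

-- ===== VERDICT (by name: the statement is the Claim_ definition above) =====
theorem max_num_occurences_substring_spec : Claim_equal_max_num_occurences_substring := by
  intro s ml mn mx _hdom hpre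
  unfold Spec_max_num_occurences_substring
  obtain ⟨hmn, hrest⟩ := hpre
  rcases hrest with hs | ⟨hml, hmx⟩
  · subst hs; exact pv_empty ml mn mx hmn
  · have h := pv_main s.toList ml mn mx hml hmx hmn
    simpa using h
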